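-- pv_equiv track=rewrite | github.com/xkrish1/BananaKart | packages/nlp_engine/exp/train_token_classification.py | _compute_entity_counts
-- ===== SOURCE A (Python) =====
-- from typing import Dict, List, Sequence
--
-- def _compute_entity_counts(
--     refs: Sequence[Sequence[str]], preds: Sequence[Sequence[str]]
-- ) -> Dict[str, Dict[str, int]]:
--     entity_names = sorted({label.split("-")[-1] for seq in refs for label in seq if label != "O"})
--     if not entity_names:
--         return {}
--     counts = {
--         name: {"true": 0, "pred": 0, "correct": 0} for name in entity_names
--     }
--
--     for ref_seq in refs:
--         for label in ref_seq:
--             if label.startswith("B-"):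
--                 counts[label.split("-", 1)[1]]["true"] += 1
--     for pred_seq in preds:
--         for label in pred_seq:
--             if label.startswith("B-"):
--                 counts[label.split("-", 1)[1]]["pred"] += 1
--
--     for ref_seq, pred_seq in zip(refs, preds):
--         ref_entities = _extract_entities(ref_seq)
--         pred_entities = _extract_entities(pred_seq)
--         for ent in ref_entities:
--             if ent in pred_entities:
--                 counts[ent[0]]["correct"] += 1
--     return counts
--
-- def _extract_entities(labels: Sequence[str]) -> List[tuple[str, int, int]]:
--     entities: List[tuple[str, int, int]] = []
--     active_label: str | None = None
--     start = 0
--     for idx, tag in enumerate(labels + ["O"]):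
--         if tag.startswith("B-"):
--             if active_label is not None:
--                 entities.append((active_label, start, idx))
--             active_label = tag.split("-", 1)[1]
--             start = idx
--         elif tag.startswith("I-"):
--             continue
--         else:
--             if active_label is not None:
--                 entities.append((active_label, start, idx))
--                 active_label = None
--     return entities
-- ===== SOURCE B (Python) =====
-- from typing import Dict, List, Sequence
--
--
-- def _extract_entities(labels: Sequence[str]) -> List[tuple[str, int, int]]:
--     # span scan: for each "B-" tag, walk forward over the following "I-" run to find the span end
--     labels = list(labels)
--     n = len(labels)
--     out: List[tuple[str, int, int]] = []
--     for i, tag in enumerate(labels):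
--         if tag.startswith("B-"):
--             j = i + 1
--             while j < n and labels[j].startswith("I-"):
--                 j += 1
--             out.append((tag.split("-", 1)[1], i, j))
--     return out
--
--
-- def _compute_entity_counts(
--     refs: Sequence[Sequence[str]], preds: Sequence[Sequence[str]]
-- ) -> Dict[str, Dict[str, int]]:
--     entity_names = sorted({label.split("-")[-1] for seq in refs for label in seq if label != "O"})
--     if not entity_names:
--         return {}
--     ref_spans = [_extract_entities(seq) for seq in refs]
--     pred_spans = [_extract_entities(seq) for seq in preds]
--     result: Dict[str, Dict[str, int]] = {}
--     for name in entity_names: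
--         t = sum(1 for spans in ref_spans for e in spans if e[0] == name)
--         p = sum(1 for spans in pred_spans for e in spans if e[0] == name)
--         c = sum(
--             1
--             for rs, ps in zip(ref_spans, pred_spans)
--             for e in rs
--             if e[0] == name and e in ps
--         )
--         result[name] = {"true": t, "pred": p, "correct": c}
--     return result
-- ===== Notes on version B (the rewrite author's own statement) =====
-- stated objective: simpler
-- what changed: B drops A's mutable nested counts dict and its three in-place increment passes: it extracts spans once per sequence with a forward index scan (instead of A's active-label state machine over labels+['O']) and then builds the result in a single pure pass over the sorted entity names, counting each name's true/pred/correct spans directly.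
-- outside the precondition, e.g. on _compute_entity_counts([['B-A-B']], []): A raises KeyError, B returns {'B': {'true': 0, 'pred': 0, 'correct': 0}}
import Mathlib
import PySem

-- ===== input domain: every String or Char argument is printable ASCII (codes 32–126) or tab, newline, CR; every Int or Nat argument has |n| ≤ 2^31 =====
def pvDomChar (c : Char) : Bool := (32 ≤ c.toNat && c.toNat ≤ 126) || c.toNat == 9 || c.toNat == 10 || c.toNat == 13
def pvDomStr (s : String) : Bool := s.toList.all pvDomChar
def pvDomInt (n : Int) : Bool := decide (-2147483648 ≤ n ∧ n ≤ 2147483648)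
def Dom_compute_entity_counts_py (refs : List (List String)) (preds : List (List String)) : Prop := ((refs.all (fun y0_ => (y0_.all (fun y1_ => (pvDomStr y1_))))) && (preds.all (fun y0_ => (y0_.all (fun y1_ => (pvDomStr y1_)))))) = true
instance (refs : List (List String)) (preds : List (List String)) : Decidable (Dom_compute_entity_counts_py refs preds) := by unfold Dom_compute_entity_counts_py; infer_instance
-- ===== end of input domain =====

-- B replaces A's mutable nested counts dict (three in-place increment passes) by one pure pass per
-- entity name that counts extracted spans directly, with span extraction done by a forward index
-- scan instead of A's state machine (objective: simpler).

-- ===== shared helpers (subexpressions both Python sources contain verbatim) =====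

-- label.split("-")[-1]; split("-") is never empty, so the [-1] index is always defined
def lastSeg (l : String) : String := ((PySem.Str.split? l "-").getD []).getLastD ""

-- label.split("-", 1)[1]; used only on labels starting with "B-", where the index 1 exists
def suffix1 (l : String) : String := (((PySem.Str.splitMax? l "-" 1).getD [])[1]?).getD ""

-- label.startswith("B-") / label.startswith("I-")
def bstart (l : String) : Bool := PySem.Str.startswith l "B-"
def istart (l : String) : Bool := PySem.Str.startswith l "I-"

-- the multiset of entity-name candidates: label.split("-")[-1] for seq in refs for label in seq if label != "O"
def pvAllNames (refs : List (List String)) : List String :=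
  refs.flatMap (fun seq => (seq.filter (fun l => l != "O")).map lastSeg)

-- sorted({…}): both programs start with this identical line
def entityNames (refs : List (List String)) : List String :=
  PySem.List.sorted (PySem.Set.ofList (pvAllNames refs)) (fun x => x) false

-- ===== PORT A =====

-- {name: {"true": 0, "pred": 0, "correct": 0} for name in entity_names}
def initCounts (names : List String) : PySem.Dict String (PySem.Dict String Int) :=
  names.foldl
    (fun d n => d.insert n (PySem.Dict.ofList [("true", 0), ("pred", 0), ("correct", 0)]))
    PySem.Dict.empty

-- counts[name][fld] += 1  (under Pre_ the keys always exist, so Python never raises KeyError here)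
def incr (c : PySem.Dict String (PySem.Dict String Int)) (name fld : String) :
    PySem.Dict String (PySem.Dict String Int) :=
  c.modify name PySem.Dict.empty (fun inner => inner.modify fld 0 (· + 1))

-- loop body of A's _extract_entities: state = (entities, active_label, start), element = (idx, tag)
def extractStep (s : List (String × Int × Int) × Option String × Int) (p : Int × String) :
    List (String × Int × Int) × Option String × Int :=
  if bstart p.2 then
    ((match s.2.1 with
      | some a => s.1 ++ [(a, s.2.2, p.1)]
      | none => s.1), some (suffix1 p.2), p.1)
  else if istart p.2 then s
  else
    match s.2.1 with
    | some a => (s.1 ++ [(a, s.2.2, p.1)], none, s.2.2)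
    | none => s

-- A's _extract_entities(labels): for idx, tag in enumerate(labels + ["O"]): …
def extractEntities (labels : List String) : List (String × Int × Int) :=
  ((PySem.List.enumerate (labels ++ ["O"])).foldl extractStep ([], none, 0)).1

def compute_entity_counts_py (refs : List (List String)) (preds : List (List String)) :
    List (String × List (String × Int)) :=
  let names := entityNames refs
  if names = [] then []
  else
    let c0 := initCounts names
    let c1 := refs.foldl
      (fun c seq => seq.foldl (fun c l => if bstart l then incr c (suffix1 l) "true" else c) c) c0
    let c2 := preds.foldl
      (fun c seq => seq.foldl (fun c l => if bstart l then incr c (suffix1 l) "pred" else c) c) c1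
    let c3 := (refs.zip preds).foldl
      (fun c pr =>
        let re := extractEntities pr.1
        let pe := extractEntities pr.2
        re.foldl (fun c ent => if ent ∈ pe then incr c ent.1 "correct" else c) c) c2
    c3.items.map (fun p => (p.1, p.2.items))

-- ===== PORT B =====

-- B's while loop 'j = i+1; while j < n and labels[j].startswith("I-"): j += 1': walk the "I-" run
-- that follows position j-1 (given as the remaining suffix of the label list) and return the end index
def chase : List String → Int → Int
  | [], j => j
  | t :: rest, j => if istart t then chase rest (j + 1) else j

-- B's _extract_entities: for i, tag in enumerate(labels): if tag.startswith("B-"): emit span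
def extractScan : Int → List String → List (String × Int × Int)
  | _, [] => []
  | i, t :: rest =>
    if bstart t then (suffix1 t, i, chase rest (i + 1)) :: extractScan (i + 1) rest
    else extractScan (i + 1) rest

def compute_entity_counts_py_alt (refs : List (List String)) (preds : List (List String)) :
    List (String × List (String × Int)) :=
  let names := entityNames refs
  if names = [] then []
  else
    let refSpans := refs.map (fun seq => extractScan 0 seq)
    let predSpans := preds.map (fun seq => extractScan 0 seq)
    names.map (fun n =>
      (n, [("true", ((refSpans.map (fun es => es.countP (fun e => e.1 == n))).sum : Int)),
           ("pred", ((predSpans.map (fun es => es.countP (fun e => e.1 == n))).sum : Int)),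
           ("correct", (((refSpans.zip predSpans).map
              (fun pr => pr.1.countP (fun e => e.1 == n && decide (e ∈ pr.2)))).sum : Int))]))

-- ===== PRECONDITION & SPEC =====

-- Pre_ excludes exactly the inputs where Python A raises KeyError: some "B-…" label in refs or
-- preds whose split("-",1) suffix is not one of the entity names collected from refs (when any exist).
def Pre_compute_entity_counts_py (refs : List (List String)) (preds : List (List String)) : Prop :=
  pvAllNames refs = [] ∨
    (∀ seq ∈ refs ++ preds, ∀ l ∈ seq, bstart l = true → suffix1 l ∈ pvAllNames refs)
instance (refs : List (List String)) (preds : List (List String)) :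
    Decidable (Pre_compute_entity_counts_py refs preds) := by
  unfold Pre_compute_entity_counts_py; infer_instance

def pvWitness_compute_entity_counts_py : List (List String) × List (List String) :=
  ([["B-PER", "O", "B-LOC", "I-LOC"]], [["B-PER", "B-LOC"]])

def Spec_compute_entity_counts_py (refs : List (List String)) (preds : List (List String))
    (out : List (String × List (String × Int))) : Prop :=
  out = compute_entity_counts_py_alt refs preds
instance (refs : List (List String)) (preds : List (List String))
    (out : List (String × List (String × Int))) :
    Decidable (Spec_compute_entity_counts_py refs preds out) := by
  unfold Spec_compute_entity_counts_py; infer_instance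

-- ===== CLAIM =====
def Claim_equal_compute_entity_counts_py : Prop :=
  ∀ (refs : List (List String)) (preds : List (List String)),
    Dom_compute_entity_counts_py refs preds →
    Pre_compute_entity_counts_py refs preds →
    Spec_compute_entity_counts_py refs preds (compute_entity_counts_py refs preds)

-- ===== LEMMAS AND PROOFS =====

-- ---- extraction: A's state machine equals B's forward scan ----

-- the entities A's machine still emits from tag list ts, starting at index i with active entity act
def emitFrom (i : Int) (act : Option (String × Int)) : List String → List (String × Int × Int)
  | [] => []
  | t :: rest =>
    if bstart t then
      (act.elim [] (fun a => [(a.1, a.2, i)])) ++ emitFrom (i + 1) (some (suffix1 t, i)) rest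
    else if istart t then emitFrom (i + 1) act rest
    else (act.elim [] (fun a => [(a.1, a.2, i)])) ++ emitFrom (i + 1) none rest

theorem foldl_extractStep (ts : List String) :
    ∀ (i : Int) (es : List (String × Int × Int)) (act : Option String) (st : Int),
      (((PySem.List.enumerate ts i).foldl extractStep (es, act, st)).1) =
        es ++ emitFrom i (act.map (fun a => (a, st))) ts := by
  induction ts with
  | nil => intro i es act st; simp [emitFrom]
  | cons t ts ih =>
    intro i es act st
    rw [PySem.List.enumerate_cons]
    simp only [List.foldl_cons]
    by_cases hb : bstart t
    · cases act <;> simp [extractStep, hb, emitFrom, ih]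
    · by_cases hi : istart t
      · cases act <;> simp [extractStep, hb, hi, emitFrom, ih]
      · cases act <;> simp [extractStep, hb, hi, emitFrom, ih]

theorem bstart_not_istart (l : String) (h : bstart l = true) : istart l = false := by
  unfold bstart istart at *
  simp only [PySem.Str.startswith] at *
  rw [PySem.Chars.startswith_iff] at h
  rw [Bool.eq_false_iff]
  intro hi
  rw [PySem.Chars.startswith_iff] at hi
  obtain ⟨r1, h1⟩ := h
  obtain ⟨r2, h2⟩ := hi
  rw [← h2] at h1
  simp at h1

theorem emitFrom_append_O (ls : List String) :
    ∀ (i : Int) (act : Option (String × Int)),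
      emitFrom i act (ls ++ ["O"]) =
        (act.elim [] (fun a => [(a.1, a.2, chase ls i)])) ++ extractScan i ls := by
  induction ls with
  | nil =>
    intro i act
    have hb : bstart "O" = false := by decide
    have hi : istart "O" = false := by decide
    cases act <;> simp [emitFrom, hb, hi, extractScan, chase]
  | cons t rest ih =>
    intro i act
    by_cases hb : bstart t
    · have hi := bstart_not_istart t hb
      cases act <;> simp [emitFrom, hb, hi, extractScan, chase, ih]
    · by_cases hi : istart t
      · cases act <;> simp [emitFrom, hb, hi, extractScan, chase, ih]
      · cases act <;> simp [emitFrom, hb, hi, extractScan, chase, ih]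

theorem extractEntities_eq_scan (ls : List String) : extractEntities ls = extractScan 0 ls := by
  unfold extractEntities
  rw [foldl_extractStep]
  simp [emitFrom_append_O]

theorem extractScan_map_fst (ls : List String) :
    ∀ i, (extractScan i ls).map (·.1) = (ls.filter bstart).map suffix1 := by
  induction ls with
  | nil => intro i; simp [extractScan]
  | cons t rest ih =>
    intro i
    by_cases hb : bstart t <;> simp [extractScan, hb, ih]

-- ---- counting: the effect of A's incr folds, pointwise ----

-- bump one field of an inner counts dict
def bumpD (fld : String) (d : PySem.Dict String Int) : PySem.Dict String Int :=
  d.modify fld 0 (· + 1)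

def inner3 (t p c : Int) : PySem.Dict String Int :=
  PySem.Dict.ofList [("true", t), ("pred", p), ("correct", c)]

theorem getD_foldl_incr (fld : String) (n : String) (ms : List String) :
    ∀ c, (ms.foldl (fun c m => incr c m fld) c).getD n PySem.Dict.empty =
      (bumpD fld)^[ms.count n] (c.getD n PySem.Dict.empty) := by
  induction ms with
  | nil => intro c; simp
  | cons m ms ih =>
    intro c
    simp only [List.foldl_cons, List.count_cons]
    rw [ih]
    by_cases h : m = n
    · subst h
      have : (incr c m fld).getD m PySem.Dict.empty = bumpD fld (c.getD m PySem.Dict.empty) := by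
        unfold incr bumpD
        rw [PySem.Dict.getD_modify]
        simp
      rw [this]
      simp [Function.iterate_succ_apply]
    · have : (incr c m fld).getD n PySem.Dict.empty = c.getD n PySem.Dict.empty := by
        unfold incr
        rw [PySem.Dict.getD_modify]
        simp [Ne.symm h]
      rw [this]
      simp [h]

theorem bump_true (t p c : Int) : bumpD "true" (inner3 t p c) = inner3 (t + 1) p c := by rfl
theorem bump_pred (t p c : Int) : bumpD "pred" (inner3 t p c) = inner3 t (p + 1) c := by rfl
theorem bump_correct (t p c : Int) : bumpD "correct" (inner3 t p c) = inner3 t p (c + 1) := by rfl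

theorem iterate_bump_true (k : Nat) : ∀ t p c, (bumpD "true")^[k] (inner3 t p c) = inner3 (t + k) p c := by
  induction k with
  | zero => intro t p c; simp
  | succ k ih =>
    intro t p c
    rw [Function.iterate_succ_apply, bump_true, ih]
    congr 1
    push_cast
    ring

theorem iterate_bump_pred (k : Nat) : ∀ t p c, (bumpD "pred")^[k] (inner3 t p c) = inner3 t (p + k) c := by
  induction k with
  | zero => intro t p c; simp
  | succ k ih =>
    intro t p c
    rw [Function.iterate_succ_apply, bump_pred, ih]
    congr 1
    push_cast
    ring

theorem iterate_bump_correct (k : Nat) : ∀ t p c, (bumpD "correct")^[k] (inner3 t p c) = inner3 t p (c + k) := by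
  induction k with
  | zero => intro t p c; simp
  | succ k ih =>
    intro t p c
    rw [Function.iterate_succ_apply, bump_correct, ih]
    congr 1
    push_cast
    ring

theorem getD_initCounts (names : List String) :
    ∀ (d : PySem.Dict String (PySem.Dict String Int)) (n : String), (names.foldl (fun d m => d.insert m (inner3 0 0 0)) d).getD n PySem.Dict.empty =
      if n ∈ names then inner3 0 0 0 else d.getD n PySem.Dict.empty := by
  induction names with
  | nil => intro d n; simp
  | cons m names ih =>
    intro d n
    simp only [List.foldl_cons]
    rw [ih]
    by_cases h : n ∈ names
    · simp [h]
    · by_cases h2 : n = m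
      · subst h2; simp [h]
      · simp [h, h2, PySem.Dict.getD_insert]

theorem update_of_subset (ms : List String) :
    ∀ (s : PySem.Set String), (∀ m ∈ ms, m ∈ s) → PySem.Set.update s ms = s := by
  induction ms with
  | nil => intro s _; rfl
  | cons m ms ih =>
    intro s h
    have : PySem.Set.update s (m :: ms) = PySem.Set.update (PySem.Set.add s m) ms := rfl
    rw [this, PySem.Set.add_of_mem (h m (by simp))]
    exact ih s (fun x hx => h x (by simp [hx]))

theorem keys_foldl_incr (fld : String) (ms : List String) (c : PySem.Dict String (PySem.Dict String Int))
    (h : ∀ m ∈ ms, m ∈ c.keys) :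
    (ms.foldl (fun c m => incr c m fld) c).keys = c.keys := by
  unfold incr
  rw [PySem.Dict.keys_foldl_modify_key ms (fun m => m) PySem.Dict.empty
    (fun _ _ inner => inner.modify fld 0 (· + 1)) c]
  simp only [List.map_id']
  exact update_of_subset ms c.keys h

-- ---- reshaping A's nested conditional folds into flat incr folds ----

theorem pass_if (fld : String) (seq : List String) :
    ∀ (c : PySem.Dict String (PySem.Dict String Int)),
      seq.foldl (fun c l => if bstart l then incr c (suffix1 l) fld else c) c =
        ((seq.filter bstart).map suffix1).foldl (fun c m => incr c m fld) c := by
  induction seq with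
  | nil => intro c; rfl
  | cons l seq ih =>
    intro c
    by_cases hb : bstart l <;> simp [hb, ih]

theorem pass_if_mem (fld : String) (pe : List (String × Int × Int)) (re : List (String × Int × Int)) :
    ∀ (c : PySem.Dict String (PySem.Dict String Int)),
      re.foldl (fun c ent => if ent ∈ pe then incr c ent.1 fld else c) c =
        ((re.filter (fun e => decide (e ∈ pe))).map (fun e => e.1)).foldl
          (fun c m => incr c m fld) c := by
  induction re with
  | nil => intro c; rfl
  | cons e re ih =>
    intro c
    by_cases he : e ∈ pe <;> simp [he, ih]

theorem outer_flat {β : Type} (fld : String) (f : β → List String) (xs : List β) :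
    ∀ (c : PySem.Dict String (PySem.Dict String Int)),
      xs.foldl (fun c x => (f x).foldl (fun c m => incr c m fld) c) c =
        (xs.flatMap f).foldl (fun c m => incr c m fld) c := by
  induction xs with
  | nil => intro c; rfl
  | cons x xs ih => intro c; simp [List.foldl_append, ih]

-- ---- the whole incr pipeline, as items ----

theorem initCounts_eq (names : List String) :
    initCounts names = names.foldl (fun d m => d.insert m (inner3 0 0 0)) PySem.Dict.empty := rfl

theorem inner3_items (t p c : Int) :
    (inner3 t p c).items = [("true", t), ("pred", p), ("correct", c)] := rfl

theorem counts_items (names opsT opsP opsC : List String) (hnodup : names.Nodup)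
    (hT : ∀ m ∈ opsT, m ∈ names) (hP : ∀ m ∈ opsP, m ∈ names) (hC : ∀ m ∈ opsC, m ∈ names) :
    (opsC.foldl (fun c m => incr c m "correct")
      (opsP.foldl (fun c m => incr c m "pred")
        (opsT.foldl (fun c m => incr c m "true") (initCounts names)))).items =
      names.map
        (fun n => (n, inner3 (opsT.count n) (opsP.count n) (opsC.count n))) := by
  have hk0 : (initCounts names).keys = names := by
    rw [initCounts_eq, PySem.Dict.keys_foldl_insert]
    simp only [PySem.Dict.keys_empty]
    rw [PySem.Set.update_nil_left]
    exact PySem.Set.ofList_eq_self_of_nodup _ hnodup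
  have hk1 : (opsT.foldl (fun c m => incr c m "true") (initCounts names)).keys = names := by
    rw [keys_foldl_incr _ _ _ (by rw [hk0]; exact hT), hk0]
  have hk2 : (opsP.foldl (fun c m => incr c m "pred")
      (opsT.foldl (fun c m => incr c m "true") (initCounts names))).keys = names := by
    rw [keys_foldl_incr _ _ _ (by rw [hk1]; exact hP), hk1]
  have hk3 : (opsC.foldl (fun c m => incr c m "correct")
      (opsP.foldl (fun c m => incr c m "pred")
        (opsT.foldl (fun c m => incr c m "true") (initCounts names)))).keys = names := by
    rw [keys_foldl_incr _ _ _ (by rw [hk2]; exact hC), hk2]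
  rw [PySem.Dict.items_eq_map_keys _ (by rw [hk3]; exact hnodup) PySem.Dict.empty, hk3]
  apply List.map_eq_map_iff.mpr
  intro n hn
  rw [getD_foldl_incr, getD_foldl_incr, getD_foldl_incr, initCounts_eq, getD_initCounts]
  rw [if_pos hn]
  rw [iterate_bump_true, zero_add, iterate_bump_pred, zero_add, iterate_bump_correct, zero_add]

-- ---- count bookkeeping: A's flat op counts equal B's per-sequence span counts ----

theorem countP_fst_scan (n : String) (seq : List String) :
    (extractScan 0 seq).countP (fun e => e.1 == n) =
      ((seq.filter bstart).map suffix1).countP (fun x => x == n) := by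
  rw [← extractScan_map_fst seq 0, List.countP_map]
  rfl

theorem countT_eq (n : String) (seqs : List (List String)) :
    ((seqs.flatMap (fun seq => (seq.filter bstart).map suffix1)).count n : Int) =
      (((seqs.map (fun seq => extractScan 0 seq)).map
        (fun es => es.countP (fun e => e.1 == n))).sum : Int) := by
  rw [List.map_map, List.flatMap_def, List.count_eq_countP, List.countP_flatten, List.map_map]
  norm_cast
  rw [List.map_map]
  refine congrArg List.sum ?_
  apply List.map_eq_map_iff.mpr
  intro seq _
  simp only [Function.comp_apply]
  exact congrArg Nat.cast (countP_fst_scan n seq).symm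

theorem countC_eq (n : String) (refs preds : List (List String)) :
    (((refs.zip preds).flatMap (fun pr => ((extractScan 0 pr.1).filter
        (fun e => decide (e ∈ extractScan 0 pr.2))).map (fun e => e.1))).count n : Int) =
      ((((refs.map (fun seq => extractScan 0 seq)).zip
          (preds.map (fun seq => extractScan 0 seq))).map
        (fun pr => pr.1.countP (fun e => e.1 == n && decide (e ∈ pr.2)))).sum : Int) := by
  rw [List.zip_map, List.map_map, List.flatMap_def, List.count_eq_countP, List.countP_flatten,
    List.map_map]
  norm_cast
  rw [List.map_map]
  refine congrArg List.sum ?_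
  apply List.map_eq_map_iff.mpr
  intro pr _
  simp only [Function.comp_apply, Prod.map_fst, Prod.map_snd]
  rw [List.countP_map, List.countP_filter]
  norm_cast

-- ===== VERDICT (by name: the statements are the Claim_ definitions above) =====
theorem compute_entity_counts_py_spec : Claim_equal_compute_entity_counts_py := by
  intro refs preds _ hpre
  unfold Spec_compute_entity_counts_py
  by_cases h0 : entityNames refs = []
  · simp [compute_entity_counts_py, compute_entity_counts_py_alt, h0]
  · have hAll : pvAllNames refs ≠ [] := by
      intro h
      apply h0
      unfold entityNames
      rw [h]
      rfl
    have hpre2 : ∀ seq ∈ refs ++ preds, ∀ l ∈ seq, bstart l = true →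
        suffix1 l ∈ pvAllNames refs := by
      rcases hpre with h | h
      · exact absurd h hAll
      · exact h
    have hmemN : ∀ x, x ∈ entityNames refs ↔ x ∈ pvAllNames refs := by
      intro x
      unfold entityNames
      rw [PySem.List.mem_sorted]
      exact PySem.Set.mem_ofList _ x
    have hnodup : (entityNames refs).Nodup := by
      unfold entityNames
      exact (List.Perm.nodup_iff (PySem.List.sorted_perm _ _ _)).mpr (PySem.Set.nodup_ofList _)
    have hT : ∀ m ∈ refs.flatMap (fun seq => (seq.filter bstart).map suffix1),
        m ∈ entityNames refs := by
      intro m hm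
      rcases List.mem_flatMap.mp hm with ⟨seq, hseq, hm2⟩
      rcases List.mem_map.mp hm2 with ⟨l, hl, rfl⟩
      rcases List.mem_filter.mp hl with ⟨hl1, hl2⟩
      exact (hmemN _).mpr (hpre2 seq (List.mem_append_left _ hseq) l hl1 hl2)
    have hP : ∀ m ∈ preds.flatMap (fun seq => (seq.filter bstart).map suffix1),
        m ∈ entityNames refs := by
      intro m hm
      rcases List.mem_flatMap.mp hm with ⟨seq, hseq, hm2⟩
      rcases List.mem_map.mp hm2 with ⟨l, hl, rfl⟩
      rcases List.mem_filter.mp hl with ⟨hl1, hl2⟩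
      exact (hmemN _).mpr (hpre2 seq (List.mem_append_right _ hseq) l hl1 hl2)
    have hC : ∀ m ∈ (refs.zip preds).flatMap (fun pr => ((extractScan 0 pr.1).filter
        (fun e => decide (e ∈ extractScan 0 pr.2))).map (fun e => e.1)),
        m ∈ entityNames refs := by
      intro m hm
      rcases List.mem_flatMap.mp hm with ⟨pr, hpr, hm2⟩
      rcases List.mem_map.mp hm2 with ⟨e, he, rfl⟩
      rcases List.mem_filter.mp he with ⟨he1, _⟩
      have he2 : e.1 ∈ (extractScan 0 pr.1).map (fun e => e.1) := List.mem_map_of_mem he1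
      rw [extractScan_map_fst] at he2
      rcases List.mem_map.mp he2 with ⟨l, hl, hs⟩
      rcases List.mem_filter.mp hl with ⟨hl1, hl2⟩
      rw [← hs]
      exact (hmemN _).mpr
        (hpre2 pr.1 (List.mem_append_left _ (List.of_mem_zip hpr).1) l hl1 hl2)
    simp only [compute_entity_counts_py, compute_entity_counts_py_alt,
      extractEntities_eq_scan, if_neg h0]
    simp only [pass_if, pass_if_mem, outer_flat]
    rw [counts_items _ _ _ _ hnodup hT hP hC, List.map_map]
    apply List.map_eq_map_iff.mpr
    intro n hn
    simp only [Function.comp_apply, inner3_items]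
    refine congrArg (fun x => (n, x)) ?_
    rw [countT_eq n refs, countT_eq n preds, countC_eq n refs preds]
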